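-- pv_equiv track=rewrite | github.com/KimJonghoSNU/Abstraction_gap | src/run_round6_hypbank.py | _collect_state_hypothesis_ids
-- ===== SOURCE A (Python) =====
-- from typing import Any, Dict, List, Optional, Sequence, Set, Tuple
--
-- def _collect_state_hypothesis_ids(
--     state_ledger: Dict[Tuple[int, ...], Dict[str, Any]],
--     state_paths: Sequence[Tuple[int, ...]],
--     field_name: str,
-- ) -> List[str]:
--     collected: List[str] = []
--     seen: Set[str] = set()
--     for state_path in state_paths:
--         entry = dict(state_ledger.get(tuple(state_path), {}) or {})
--         for hypothesis_id in list(entry.get(field_name, []) or []):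
--             hid = str(hypothesis_id or "").strip()
--             if (not hid) or (hid in seen):
--                 continue
--             seen.add(hid)
--             collected.append(hid)
--     return collected
-- ===== SOURCE B (Python) =====
-- from typing import Any, Dict, List, Sequence, Tuple
--
-- def _collect_state_hypothesis_ids(
--     state_ledger: Dict[Tuple[int, ...], Dict[str, Any]],
--     state_paths: Sequence[Tuple[int, ...]],
--     field_name: str,
-- ) -> List[str]:
--     # Stage 1: flatten all cleaned (stripped, non-empty) ids in one comprehension,
--     # duplicates included, preserving A's coercions exactly.
--     flat = [
--         hid
--         for state_path in state_paths
--         for raw in list(dict(state_ledger.get(tuple(state_path), {}) or {}).get(field_name, []) or [])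
--         for hid in [str(raw or "").strip()]
--         if hid
--     ]
--     # Stage 2: keep each id only at its first position, decided by a positional
--     # membership test against the prefix (no seen-set, no dict).
--     return [hid for i, hid in enumerate(flat) if hid not in flat[:i]]
-- ===== Notes on version B (the rewrite author's own statement) =====
-- stated objective: alternative
-- what changed: B first flattens all cleaned ids into one list with a nested comprehension, then deduplicates by a positional filter that keeps an id only if it does not occur in the prefix before its index (no seen-set, no dict); A interleaves seen-set bookkeeping inside nested loops.
import Mathlib
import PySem

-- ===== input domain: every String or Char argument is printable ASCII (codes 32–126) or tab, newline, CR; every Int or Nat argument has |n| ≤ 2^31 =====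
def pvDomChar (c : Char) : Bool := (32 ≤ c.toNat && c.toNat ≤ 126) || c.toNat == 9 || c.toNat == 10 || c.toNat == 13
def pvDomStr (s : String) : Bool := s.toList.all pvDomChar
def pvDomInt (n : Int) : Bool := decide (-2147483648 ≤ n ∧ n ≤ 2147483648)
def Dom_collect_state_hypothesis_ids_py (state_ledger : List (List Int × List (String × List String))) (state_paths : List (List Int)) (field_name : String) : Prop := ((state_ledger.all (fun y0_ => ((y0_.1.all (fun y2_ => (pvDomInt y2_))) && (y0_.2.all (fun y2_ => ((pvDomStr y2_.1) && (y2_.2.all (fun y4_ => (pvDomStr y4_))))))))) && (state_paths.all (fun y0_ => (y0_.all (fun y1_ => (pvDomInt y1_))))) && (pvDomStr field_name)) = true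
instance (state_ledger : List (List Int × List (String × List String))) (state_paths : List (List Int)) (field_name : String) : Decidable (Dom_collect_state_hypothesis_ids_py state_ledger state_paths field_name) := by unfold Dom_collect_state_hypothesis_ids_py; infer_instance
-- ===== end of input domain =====

-- B flattens all cleaned ids with one comprehension, then deduplicates by a positional
-- prefix-membership filter (keep an id iff it is not in flat[:i]); objective: alternative algorithm.

-- ===== PORT A =====
-- shared lookup: `dict(state_ledger.get(tuple(state_path), {}) or {})` then `.get(field_name, []) or []`
def hypIds (state_ledger : List (List Int × List (String × List String))) (field_name : String) (path : List Int) : List String :=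
  PySem.Dict.getD (PySem.Dict.mk (PySem.Dict.getD (PySem.Dict.mk state_ledger) path [])) field_name []

-- body of A's inner loop: `hid = str(hypothesis_id or "").strip(); if (not hid) or (hid in seen): continue; …`
def stepA (st : List String × PySem.Set String) (h : String) : List String × PySem.Set String :=
  let hid := PySem.Str.strip h
  if hid = "" then st
  else if PySem.Set.contains st.2 hid then st
  else (st.1 ++ [hid], PySem.Set.add st.2 hid)

def collect_state_hypothesis_ids_py (state_ledger : List (List Int × List (String × List String))) (state_paths : List (List Int)) (field_name : String) : List String :=
  (state_paths.foldl
    (fun st path => (hypIds state_ledger field_name path).foldl stepA st)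
    ([], PySem.Set.empty)).1

-- ===== PORT B =====
-- `hid = str(raw or "").strip(); if hid` of B's comprehension (on strings, `str(raw or "")` is `raw`)
def cleanId (h : String) : Option String :=
  let hid := PySem.Str.strip h
  if hid = "" then none else some hid

def collect_state_hypothesis_ids_py_alt (state_ledger : List (List Int × List (String × List String))) (state_paths : List (List Int)) (field_name : String) : List String :=
  let flat := state_paths.flatMap (fun path => (hypIds state_ledger field_name path).filterMap cleanId)
  (PySem.List.enumerate flat).filterMap
    (fun p => if p.2 ∈ PySem.List.slice flat none (some p.1) then none else some p.2)

-- ===== PRECONDITION & SPEC =====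
def Spec_collect_state_hypothesis_ids_py (state_ledger : List (List Int × List (String × List String))) (state_paths : List (List Int)) (field_name : String) (out : List String) : Prop := out = collect_state_hypothesis_ids_py_alt state_ledger state_paths field_name
instance (state_ledger : List (List Int × List (String × List String))) (state_paths : List (List Int)) (field_name : String) (out : List String) : Decidable (Spec_collect_state_hypothesis_ids_py state_ledger state_paths field_name out) := by unfold Spec_collect_state_hypothesis_ids_py; infer_instance

-- ===== CLAIM (what is proved, stated in full; the proofs are below) =====
def Claim_equal_collect_state_hypothesis_ids_py : Prop := ∀ (state_ledger : List (List Int × List (String × List String))) (state_paths : List (List Int)) (field_name : String), Dom_collect_state_hypothesis_ids_py state_ledger state_paths field_name → Spec_collect_state_hypothesis_ids_py state_ledger state_paths field_name (collect_state_hypothesis_ids_py state_ledger state_paths field_name)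

-- ===== LEMMAS AND PROOFS =====

-- A's seen-set evolution, in isolation
def stepS (s : PySem.Set String) (h : String) : PySem.Set String :=
  let hid := PySem.Str.strip h
  if hid = "" then s else PySem.Set.add s hid

-- flat-list accumulation step (the "clean and append" action, used only in the proofs)
def cleanStep (acc : List String) (h : String) : List String :=
  let hid := PySem.Str.strip h
  if hid = "" then acc else acc ++ [hid]

theorem inner_pair (l : List String) (s : PySem.Set String) :
    l.foldl stepA (s, s) = (l.foldl stepS s, l.foldl stepS s) := by
  induction l generalizing s with
  | nil => rfl
  | cons h t ih =>
    simp only [List.foldl_cons, stepA, stepS]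
    by_cases h1 : PySem.Str.strip h = ""
    · simp [h1, ih]
    · by_cases h2 : PySem.Str.strip h ∈ s
      · simp [h1, h2, PySem.Set.add, ih]
      · simp [h1, h2, PySem.Set.add, ih]

theorem clean_acc (l : List String) (a b : List String) :
    l.foldl cleanStep (a ++ b) = a ++ l.foldl cleanStep b := by
  induction l generalizing b with
  | nil => rfl
  | cons h t ih =>
    simp only [List.foldl_cons, cleanStep]
    by_cases h1 : PySem.Str.strip h = ""
    · simp [h1, ih]
    · simp [h1, ih]

theorem inner_set (l : List String) (s : PySem.Set String) :
    l.foldl stepS s = (l.foldl cleanStep []).foldl PySem.Set.add s := by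
  induction l generalizing s with
  | nil => rfl
  | cons h t ih =>
    simp only [List.foldl_cons, stepS, cleanStep]
    by_cases h1 : PySem.Str.strip h = ""
    · simp [h1, ih]
    · rw [if_neg h1, if_neg h1, ih,
        show ([] : List String) ++ [PySem.Str.strip h] = [PySem.Str.strip h] ++ [] by simp,
        clean_acc]
      simp

theorem flat_acc (ps : List (List Int)) (F : List Int → List String) (a b : List String) :
    ps.foldl (fun acc p => (F p).foldl cleanStep acc) (a ++ b)
      = a ++ ps.foldl (fun acc p => (F p).foldl cleanStep acc) b := by
  induction ps generalizing b with
  | nil => rfl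
  | cons p t ih => simp only [List.foldl_cons, clean_acc, ih]

theorem flat_acc' (ps : List (List Int)) (F : List Int → List String) (a : List String) :
    ps.foldl (fun acc p => (F p).foldl cleanStep acc) a
      = a ++ ps.foldl (fun acc p => (F p).foldl cleanStep acc) [] := by
  have := flat_acc ps F a []
  simpa using this

theorem outer_pair (ps : List (List Int)) (F : List Int → List String) (s : PySem.Set String) :
    ps.foldl (fun st p => (F p).foldl stepA st) (s, s)
      = (ps.foldl (fun s p => (F p).foldl stepS s) s, ps.foldl (fun s p => (F p).foldl stepS s) s) := by
  induction ps generalizing s with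
  | nil => rfl
  | cons p t ih => simp only [List.foldl_cons, inner_pair, ih]

theorem outer_flat (ps : List (List Int)) (F : List Int → List String) (s : PySem.Set String) :
    ps.foldl (fun s p => (F p).foldl stepS s) s
      = (ps.foldl (fun acc p => (F p).foldl cleanStep acc) []).foldl PySem.Set.add s := by
  induction ps generalizing s with
  | nil => rfl
  | cons p t ih =>
    rw [List.foldl_cons, List.foldl_cons, ih, inner_set]
    conv_rhs => rw [flat_acc' t F ((F p).foldl cleanStep [])]
    rw [List.foldl_append]

-- the clean-and-append fold is the filterMap of B's comprehension
theorem clean_filterMap (l : List String) :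
    l.foldl cleanStep [] = l.filterMap cleanId := by
  induction l with
  | nil => rfl
  | cons h t ih =>
    simp only [List.foldl_cons, List.filterMap_cons, cleanStep, cleanId]
    by_cases h1 : PySem.Str.strip h = ""
    · simp [cleanId, h1, ih]
    · rw [if_neg h1, if_neg h1,
        show ([] : List String) ++ [PySem.Str.strip h] = [PySem.Str.strip h] ++ [] by simp,
        clean_acc, ih]
      rfl

theorem flat_eq (ps : List (List Int)) (F : List Int → List String) :
    ps.foldl (fun acc p => (F p).foldl cleanStep acc) []
      = ps.flatMap (fun p => (F p).filterMap cleanId) := by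
  induction ps with
  | nil => rfl
  | cons p t ih =>
    rw [List.foldl_cons, flat_acc', ih, clean_filterMap, List.flatMap_cons]

-- the positional prefix filter is first-occurrence dedup
theorem pos_eq_dedup (l : List String) :
    (PySem.List.enumerate l).filterMap
        (fun p => if p.2 ∈ PySem.List.slice l none (some p.1) then none else some p.2)
      = PySem.List.dedup l := by
  induction l using List.reverseRecOn with
  | nil => rfl
  | append_singleton l x ih =>
    rw [show PySem.List.enumerate (l ++ [x]) = PySem.List.enumerate (l ++ [x]) 0 from rfl,
        PySem.List.enumerate_append, List.filterMap_append]
    have h1 : (PySem.List.enumerate l 0).filterMap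
        (fun p => if p.2 ∈ PySem.List.slice (l ++ [x]) none (some p.1) then none else some p.2)
        = (PySem.List.enumerate l 0).filterMap
        (fun p => if p.2 ∈ PySem.List.slice l none (some p.1) then none else some p.2) := by
      apply List.filterMap_congr
      intro p hp
      obtain ⟨k, hk, rfl⟩ := (PySem.List.mem_enumerate_iff _ _ _).1 hp
      have : ((0 : Int) + k) = ((k : Nat) : Int) := by omega
      rw [this, PySem.List.slice_to_natCast, PySem.List.slice_to_natCast,
          List.take_append_of_le_length (le_of_lt hk)]
    rw [h1, ih]
    rw [PySem.List.dedup_eq_ofList, PySem.List.dedup_eq_ofList, PySem.Set.ofList_eq_foldl,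
        PySem.Set.ofList_eq_foldl, List.foldl_append]
    simp only [List.foldl_cons, List.foldl_nil, PySem.Set.add]
    by_cases hx : x ∈ l
    · simp [hx, ← PySem.Set.ofList_eq_foldl]
    · simp [hx, ← PySem.Set.ofList_eq_foldl]

-- ===== VERDICT (by name: the statement is the Claim_ definition above) =====
theorem collect_state_hypothesis_ids_py_spec : Claim_equal_collect_state_hypothesis_ids_py := by
  intro sl sp fn _
  unfold Spec_collect_state_hypothesis_ids_py collect_state_hypothesis_ids_py collect_state_hypothesis_ids_py_alt
  rw [show (PySem.Set.empty : PySem.Set String) = [] from rfl]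
  rw [show (([], []) : List String × PySem.Set String) = (([] : PySem.Set String), ([] : PySem.Set String)) from rfl]
  rw [outer_pair sp (hypIds sl fn), ← flat_eq sp (hypIds sl fn), pos_eq_dedup,
      outer_flat sp (hypIds sl fn)]
  rw [PySem.List.dedup_eq_ofList, PySem.Set.ofList_eq_foldl]
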